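-- pv_equiv track=rewrite | github.com/sajjadium/ctf-archives | ctfs/D3CTF/2024/crypto/sym_signin/task_utils.py | key_ex
-- ===== SOURCE A (Python) =====
-- def key_ex(num: int) -> int:
--     result = 0
--     bit_position = 0
--     while num > 0:
--         original_bits = num & 0b111
--         parity_bit = bin(original_bits).count('1') % 2
--         result |= (original_bits << (bit_position + 1)
--                    ) | (parity_bit << bit_position)
--         num >>= 3
--         bit_position += 4
--     return result
-- ===== SOURCE B (Python) =====
-- def key_ex(num: int) -> int:
--     if num <= 0:
--         return 0
--     bits = bin(num)[2:]
--     bits = '0' * (-len(bits) % 3) + bits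
--     out = []
--     for i in range(0, len(bits), 3):
--         g = bits[i:i + 3]
--         out.append(g + str(g.count('1') % 2))
--     return int(''.join(out), 2)
-- ===== Notes on version B (the rewrite author's own statement) =====
-- stated objective: alternative
-- what changed: A accumulates the result LSB-first with integer masking, shifting and OR-ing in a while loop; B builds the zero-padded binary string of num, walks its 3-character groups MSB-first appending a parity character to each, and parses the joined string back with int(_, 2).
import Mathlib
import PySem

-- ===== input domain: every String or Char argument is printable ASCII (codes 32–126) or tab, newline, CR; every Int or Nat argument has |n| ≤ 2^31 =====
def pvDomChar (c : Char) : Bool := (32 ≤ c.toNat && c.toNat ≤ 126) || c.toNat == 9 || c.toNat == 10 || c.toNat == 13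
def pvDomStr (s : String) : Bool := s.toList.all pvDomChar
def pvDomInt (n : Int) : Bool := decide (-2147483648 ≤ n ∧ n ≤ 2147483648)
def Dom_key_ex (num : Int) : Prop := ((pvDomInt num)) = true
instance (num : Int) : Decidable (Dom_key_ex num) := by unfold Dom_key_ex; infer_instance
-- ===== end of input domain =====

-- B replaces A's LSB-first mask/shift/or accumulation by an MSB-first pass over the
-- zero-padded binary string in 3-character groups (objective: alternative; same cost).

-- ===== PORT A =====

-- bin(x).count('1') for x ≥ 0: number of 1s in the binary expansion
def pvOnes : Nat → Nat
  | 0 => 0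
  | n+1 => (n+1) % 2 + pvOnes ((n+1)/2)
decreasing_by exact Nat.div_lt_self (Nat.succ_pos n) one_lt_two

-- the while-loop of A; bit_position is a nonnegative counter used only as a shift amount
def keyExLoop (num result : Int) (bitPosition : Nat) : Int :=
  if num > 0 then
    let originalBits := Int.land num 7                              -- num & 0b111
    let parityBit : Int := (pvOnes originalBits.toNat % 2 : Nat)    -- bin(..).count('1') % 2 (originalBits ≥ 0 here)
    let result' := Int.lor result
        (Int.lor (originalBits <<< (bitPosition + 1)) (parityBit <<< bitPosition))
    keyExLoop (num >>> (3 : Nat)) result' (bitPosition + 4)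
  else result
termination_by num.toNat
decreasing_by
  rename_i h
  have hn : num = ((num.toNat : Nat) : Int) := (Int.toNat_of_nonneg (le_of_lt h)).symm
  rw [hn, ← Int.natCast_shiftRight, Int.toNat_natCast, Nat.shiftRight_eq_div_pow]
  exact Nat.div_lt_self (by omega) (by norm_num)

def key_ex (num : Int) : Int := keyExLoop num 0 0

-- ===== PORT B =====

-- bin(n)[2:] for n > 0: binary digit characters, most significant first ([] for 0)
def pvBin : Nat → List Char
  | 0 => []
  | n+1 => pvBin ((n+1)/2) ++ [if (n+1) % 2 = 1 then '1' else '0']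
decreasing_by exact Nat.div_lt_self (Nat.succ_pos n) one_lt_two

-- the slices bits[i:i+3] for i in range(0, len(bits), 3) (the length is a multiple of 3)
def pvGroups3 : List Char → List (List Char)
  | [] => []
  | a :: b :: c :: rest => [a, b, c] :: pvGroups3 rest
  | l => [l]

-- int(s, 2) for s over '0'/'1'
def pvInt2 (l : List Char) : Int :=
  l.foldl (fun a c => a * 2 + (if c = '1' then 1 else 0)) 0

def key_ex_alt (num : Int) : Int :=
  if num ≤ 0 then 0
  else
    let bits := pvBin num.toNat
    let bits := List.replicate ((3 - bits.length % 3) % 3) '0' ++ bits   -- '0' * (-len(bits) % 3) + bits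
    pvInt2 ((pvGroups3 bits).map
      (fun g => g ++ [if g.count '1' % 2 = 1 then '1' else '0'])).flatten

-- ===== PRECONDITION & SPEC =====
def Spec_key_ex (num : Int) (out : Int) : Prop := out = key_ex_alt num
instance (num : Int) (out : Int) : Decidable (Spec_key_ex num out) := by unfold Spec_key_ex; infer_instance

-- ===== CLAIM (what is proved, stated in full; the proofs are below) =====
def Claim_equal_key_ex : Prop := ∀ (num : Int), Dom_key_ex num → Spec_key_ex num (key_ex num)

-- ===== LEMMAS AND PROOFS =====

-- the common mathematical value of both programs: a parity bit inserted under each 3-bit group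

def pvEnc (g : Nat) : Nat := 2 * g + pvOnes g % 2

def pvE (n : Nat) : Nat :=
  if n = 0 then 0 else pvE (n / 8) * 16 + pvEnc (n % 8)
decreasing_by exact Nat.div_lt_self (by omega) (by norm_num)

theorem pvE_step (m g : Nat) (hg : g < 8) : pvE (m * 8 + g) = pvE m * 16 + pvEnc g := by
  by_cases h : m * 8 + g = 0
  · have hm : m = 0 := by omega
    have hgz : g = 0 := by omega
    subst hm hgz
    simp [pvE, pvEnc, pvOnes]
  · rw [pvE, if_neg h]
    have h1 : (m * 8 + g) / 8 = m := by omega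
    have h2 : (m * 8 + g) % 8 = g := by omega
    rw [h1, h2]

theorem pvOnes_le (g : Nat) (h : g < 8) : pvEnc g < 16 := by
  interval_cases g <;> simp [pvEnc, pvOnes]

theorem nat_lor_add (r x p : Nat) (hr : r < 2 ^ p) : r ||| x * 2 ^ p = r + x * 2 ^ p := by
  rw [Nat.lor_comm, mul_comm]
  have := Nat.two_pow_add_eq_or_of_lt (i := p) (b := r) hr x
  omega

theorem keyExLoop_eq (n r p : Nat) (hr : r < 2 ^ p) :
    keyExLoop (n : Int) (r : Int) p = ((r + pvE n * 2 ^ p : Nat) : Int) := by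
  induction n using Nat.strong_induction_on generalizing r p with
  | _ n ih =>
    rw [keyExLoop]
    by_cases hn : 0 < n
    · rw [if_pos (by exact_mod_cast hn)]
      have hland : Int.land (n : Int) 7 = ((n % 8 : Nat) : Int) := by
        have : Int.land (n : Int) ((7 : Nat) : Int) = ((n &&& 7 : Nat) : Int) := by
          simp [Int.land]
        simpa [Nat.and_two_pow_sub_one_eq_mod n 3] using this
      rw [hland]
      have hsh : ((n : Int) >>> (3 : Nat)) = ((n / 8 : Nat) : Int) := by
        rw [← Int.natCast_shiftRight, Nat.shiftRight_eq_div_pow]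
      rw [hsh]
      simp only [Int.toNat_natCast]
      -- result'
      have hcast : ∀ (a b : Nat), Int.lor (a : Int) (b : Int) = ((a ||| b : Nat) : Int) := by
        intro a b; simp [Int.lor]
      rw [← Int.natCast_shiftLeft, ← Int.natCast_shiftLeft, hcast, hcast]
      have henc : (n % 8) <<< (p + 1) ||| (pvOnes (n % 8) % 2) <<< p = pvEnc (n % 8) * 2 ^ p := by
        rw [Nat.shiftLeft_eq, Nat.shiftLeft_eq, Nat.lor_comm]
        rw [nat_lor_add _ _ _ (by
          have : pvOnes (n % 8) % 2 < 2 := Nat.mod_lt _ (by norm_num)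
          calc pvOnes (n % 8) % 2 * 2 ^ p ≤ 1 * 2 ^ p := by
                have : pvOnes (n % 8) % 2 ≤ 1 := by omega
                exact Nat.mul_le_mul_right _ this
            _ < 2 ^ (p + 1) := by rw [pow_succ]; omega)]
        rw [pvEnc, pow_succ]; ring
      rw [henc]
      have hr' : r ||| pvEnc (n % 8) * 2 ^ p = r + pvEnc (n % 8) * 2 ^ p :=
        nat_lor_add _ _ _ hr
      rw [hr']
      have hlt : r + pvEnc (n % 8) * 2 ^ p < 2 ^ (p + 4) := by
        have h1 : pvEnc (n % 8) < 16 := pvOnes_le _ (Nat.mod_lt _ (by norm_num))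
        have : pvEnc (n % 8) * 2 ^ p ≤ 15 * 2 ^ p := Nat.mul_le_mul_right _ (by omega)
        have h2 : 2 ^ (p + 4) = 16 * 2 ^ p := by ring
        omega
      rw [ih (n / 8) (Nat.div_lt_self hn (by norm_num)) _ _ hlt]
      congr 1
      have hE : pvE n = pvE (n / 8) * 16 + pvEnc (n % 8) := by
        rw [pvE, if_neg (by omega)]
      have h2 : 2 ^ (p + 4) = 2 ^ p * 16 := by ring
      rw [hE, h2]; ring
    · rw [if_neg (by exact_mod_cast hn)]
      have : n = 0 := by omega
      subst this
      rw [pvE]; simp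

theorem key_ex_eq (num : Int) :
    key_ex num = if 0 < num then ((pvE num.toNat : Nat) : Int) else 0 := by
  unfold key_ex
  by_cases h : 0 < num
  · rw [if_pos h]
    have hn : num = ((num.toNat : Nat) : Int) := (Int.toNat_of_nonneg (le_of_lt h)).symm
    rw [hn, Int.toNat_natCast]
    have := keyExLoop_eq num.toNat 0 0 (by norm_num)
    simpa using this
  · rw [if_neg h, keyExLoop, if_neg (by omega)]

def pvBit (c : Char) : Nat := if c = '1' then 1 else 0

def pvValFold (a : Nat) (l : List Char) : Nat :=
  l.foldl (fun a c => a * 2 + pvBit c) a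

def pvBinary (l : List Char) : Prop := ∀ c ∈ l, c = '0' ∨ c = '1'

theorem pvValFold_cons (a : Nat) (c : Char) (l : List Char) :
    pvValFold a (c :: l) = pvValFold (a * 2 + pvBit c) l := rfl

theorem pvValFold_append (a : Nat) (l1 l2 : List Char) :
    pvValFold a (l1 ++ l2) = pvValFold (pvValFold a l1) l2 := List.foldl_append

theorem pvBit_lt (c : Char) : pvBit c < 2 := by unfold pvBit; split <;> norm_num

theorem pvCount3 (a b c : Char) (ha : a = '0' ∨ a = '1') (hb : b = '0' ∨ b = '1')
    (hc : c = '0' ∨ c = '1') :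
    List.count '1' [a, b, c] = pvBit a + pvBit b + pvBit c := by
  rcases ha with ha | ha <;> rcases hb with hb | hb <;> rcases hc with hc | hc <;>
    subst ha hb hc <;> decide

theorem pvOnes_small (x y z : Nat) (hx : x < 2) (hy : y < 2) (hz : z < 2) :
    pvOnes (4 * x + 2 * y + z) = x + y + z := by
  interval_cases x <;> interval_cases y <;> interval_cases z <;> norm_num [pvOnes]

theorem pvGroups3_eq : ∀ (l : List Char), pvBinary l → l.length % 3 = 0 → ∀ v : Nat,
    pvValFold (pvE v) ((pvGroups3 l).map
      (fun g => g ++ [if g.count '1' % 2 = 1 then '1' else '0'])).flatten = pvE (pvValFold v l) := by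
  intro l
  induction l using pvGroups3.induct with
  | case1 => intro _ _ v; simp [pvGroups3, pvValFold]
  | case2 a b c rest ih =>
    intro hb h3 v
    have ha := hb a (by simp)
    have hbb := hb b (by simp)
    have hc := hb c (by simp)
    have hbr : pvBinary rest := fun x hx => hb x (by simp [hx])
    have h3r : rest.length % 3 = 0 := by simp at h3; omega
    have hx := pvBit_lt a
    have hy := pvBit_lt b
    have hz := pvBit_lt c
    have hg : 4 * pvBit a + 2 * pvBit b + pvBit c < 8 := by omega
    have hp : pvBit (if List.count '1' [a, b, c] % 2 = 1 then '1' else '0')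
        = (pvBit a + pvBit b + pvBit c) % 2 := by
      rw [pvCount3 a b c ha hbb hc]
      rcases Nat.mod_two_eq_zero_or_one (pvBit a + pvBit b + pvBit c) with h | h <;>
        rw [h] <;> simp [pvBit]
    simp only [pvGroups3, List.map_cons, List.flatten_cons]
    rw [pvValFold_append]
    have h1 : pvValFold (pvE v)
        ([a, b, c] ++ [if List.count '1' [a, b, c] % 2 = 1 then '1' else '0'])
        = (((pvE v * 2 + pvBit a) * 2 + pvBit b) * 2 + pvBit c) * 2
          + pvBit (if List.count '1' [a, b, c] % 2 = 1 then '1' else '0') := rfl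
    have h2 : (((pvE v * 2 + pvBit a) * 2 + pvBit b) * 2 + pvBit c) * 2
          + (pvBit a + pvBit b + pvBit c) % 2
        = pvE (v * 8 + (4 * pvBit a + 2 * pvBit b + pvBit c)) := by
      rw [pvE_step v _ hg]
      unfold pvEnc
      rw [pvOnes_small _ _ _ hx hy hz]
      omega
    rw [h1, hp, h2]
    have h4 : pvValFold v (a :: b :: c :: rest)
        = pvValFold (v * 8 + (4 * pvBit a + 2 * pvBit b + pvBit c)) rest := by
      rw [pvValFold_cons, pvValFold_cons, pvValFold_cons]
      congr 1
      ring
    rw [h4]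
    exact ih hbr h3r _
  | case3 x h1 h2 =>
    intro _ hlen
    exfalso
    rcases x with _ | ⟨a, _ | ⟨b, _ | ⟨c, r⟩⟩⟩
    · exact h1 rfl
    · simp at hlen
    · simp at hlen
    · exact h2 a b c r rfl

theorem pvBin_binary (n : Nat) : pvBinary (pvBin n) := by
  induction n using Nat.strong_induction_on with
  | _ n ih =>
    match n with
    | 0 => intro c hc; simp [pvBin] at hc
    | m+1 =>
      intro c hc
      rw [pvBin] at hc
      rcases List.mem_append.mp hc with h | h
      · exact ih ((m+1)/2) (Nat.div_lt_self (Nat.succ_pos m) one_lt_two) c h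
      · simp at h
        subst h
        split <;> simp

theorem pvBin_val (n : Nat) : ∀ a : Nat, pvValFold a (pvBin n) = a * 2 ^ (pvBin n).length + n := by
  induction n using Nat.strong_induction_on with
  | _ n ih =>
    match n with
    | 0 => intro a; simp [pvBin, pvValFold]
    | m+1 =>
      intro a
      rw [pvBin, pvValFold_append, ih ((m+1)/2) (Nat.div_lt_self (Nat.succ_pos m) one_lt_two) a]
      have hbit : pvBit (if (m+1) % 2 = 1 then '1' else '0') = (m+1) % 2 := by
        rcases Nat.mod_two_eq_zero_or_one (m+1) with h | h <;> rw [h] <;> simp [pvBit]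
      have : pvValFold (a * 2 ^ (pvBin ((m+1)/2)).length + (m+1)/2)
          [if (m+1) % 2 = 1 then '1' else '0']
          = (a * 2 ^ (pvBin ((m+1)/2)).length + (m+1)/2) * 2 + pvBit (if (m+1) % 2 = 1 then '1' else '0') := rfl
      rw [this, hbit, List.length_append]
      simp [pow_succ]
      ring_nf
      omega

theorem pvZeros (k : Nat) : ∀ a : Nat, a = 0 → pvValFold a (List.replicate k '0') = 0 := by
  induction k with
  | zero => intro a ha; simpa [pvValFold] using ha
  | succ k ih =>
    intro a ha
    rw [List.replicate_succ, pvValFold_cons]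
    exact ih _ (by simp [ha, pvBit])

theorem pvInt2_eq (l : List Char) : ∀ a : Nat,
    (l.foldl (fun a c => a * 2 + (if c = '1' then 1 else 0)) (a : Int)) = ((pvValFold a l : Nat) : Int) := by
  induction l with
  | nil => intro a; simp [pvValFold]
  | cons c l ih =>
    intro a
    rw [List.foldl_cons]
    have : ((a : Int) * 2 + (if c = '1' then 1 else 0)) = ((a * 2 + pvBit c : Nat) : Int) := by
      unfold pvBit; split <;> push_cast <;> ring
    rw [this, ih]
    rfl

theorem pvInt2_eq' (l : List Char) : pvInt2 l = ((pvValFold 0 l : Nat) : Int) := by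
  have h := pvInt2_eq l 0
  unfold pvInt2
  simpa using h

theorem key_ex_alt_eq (num : Int) :
    key_ex_alt num = if 0 < num then ((pvE num.toNat : Nat) : Int) else 0 := by
  unfold key_ex_alt
  by_cases h : num ≤ 0
  · rw [if_pos h, if_neg (by omega)]
  · rw [if_neg h, if_pos (by omega)]
    have hbinary : pvBinary (List.replicate ((3 - (pvBin num.toNat).length % 3) % 3) '0' ++ pvBin num.toNat) := by
      intro c hc
      rcases List.mem_append.mp hc with hc | hc
      · left; exact (List.eq_of_mem_replicate hc)
      · exact pvBin_binary _ c hc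
    have hlen : (List.replicate ((3 - (pvBin num.toNat).length % 3) % 3) '0' ++ pvBin num.toNat).length % 3 = 0 := by
      simp [List.length_append]
      omega
    have hval : pvValFold 0 (List.replicate ((3 - (pvBin num.toNat).length % 3) % 3) '0' ++ pvBin num.toNat) = num.toNat := by
      rw [pvValFold_append, pvZeros _ 0 rfl]
      simpa using pvBin_val num.toNat 0
    have h0 : pvE 0 = 0 := by rw [pvE]; simp
    have hmain := pvInt2_eq' ((pvGroups3 (List.replicate ((3 - (pvBin num.toNat).length % 3) % 3) '0' ++ pvBin num.toNat)).map
      (fun g => g ++ [if g.count '1' % 2 = 1 then '1' else '0'])).flatten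
    have h2 : pvValFold 0 ((pvGroups3 (List.replicate ((3 - (pvBin num.toNat).length % 3) % 3) '0' ++ pvBin num.toNat)).map
        (fun g => g ++ [if g.count '1' % 2 = 1 then '1' else '0'])).flatten = pvE num.toNat := by
      have hG := pvGroups3_eq _ hbinary hlen 0
      rw [hval] at hG
      rw [← hG, h0]
    rw [h2] at hmain
    exact hmain

-- ===== VERDICT (by name: the statement is the Claim_ definition above) =====
theorem key_ex_spec : Claim_equal_key_ex := by
  intro num _
  unfold Spec_key_ex
  rw [key_ex_eq, key_ex_alt_eq]
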